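-- pv_equiv track=rewrite | github.com/macul99/algo_study | num_item_bigger_in_front.py | count_bigger_fenwick_strict
-- ===== SOURCE A (Python) =====
-- def count_bigger_fenwick_strict(nums):
--     """
--     Fenwick Tree: Count STRICTLY bigger elements (current implementation)
--     Time Complexity: O(n log n)
--     Space Complexity: O(n)
--
--     i & -i keep only the right most bit of i
--     """
--     sorted_unique = sorted(set(nums))
--     idx_map = {v: i for i, v in enumerate(sorted_unique)}
--     n = len(sorted_unique)
--     tree = [0] * (n + 2)
--
--     def update(i):
--         i += 1 # 1-indexed
--         while i < len(tree):
--             tree[i] += 1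
--             i += i & -i # moves up the tree hierarchy
--
--     def query(i):
--         res = 0
--         i += 1 # 1-indexed
--         while i > 0:
--             res += tree[i]
--             i -= i & -i # moves down the tree hierarchy
--         return res
--
--     result = []
--     for num in nums:
--         idx = idx_map[num]
--         # Count elements <= current value, subtract from total to get strictly bigger
--         total_seen = len(result)
--         elements_le_current = query(idx)
--         bigger_count = total_seen - elements_le_current
--         result.append(bigger_count)
--         update(idx)
--
--     return result
-- ===== SOURCE B (Python) =====
-- def count_bigger_fenwick_strict(nums):
--     # Direct quadratic scan: for each position i, count earlier elements strictly greater.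
--     return [len([x for x in nums[:i] if x > nums[i]]) for i in range(len(nums))]
-- ===== Notes on version B (the rewrite author's own statement) =====
-- stated objective: simpler
-- what changed: Replaces A's coordinate compression (sorted set + index dict) and Fenwick tree with a direct nested scan: for each position i, count the elements of nums[:i] strictly greater than nums[i].
import Mathlib
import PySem

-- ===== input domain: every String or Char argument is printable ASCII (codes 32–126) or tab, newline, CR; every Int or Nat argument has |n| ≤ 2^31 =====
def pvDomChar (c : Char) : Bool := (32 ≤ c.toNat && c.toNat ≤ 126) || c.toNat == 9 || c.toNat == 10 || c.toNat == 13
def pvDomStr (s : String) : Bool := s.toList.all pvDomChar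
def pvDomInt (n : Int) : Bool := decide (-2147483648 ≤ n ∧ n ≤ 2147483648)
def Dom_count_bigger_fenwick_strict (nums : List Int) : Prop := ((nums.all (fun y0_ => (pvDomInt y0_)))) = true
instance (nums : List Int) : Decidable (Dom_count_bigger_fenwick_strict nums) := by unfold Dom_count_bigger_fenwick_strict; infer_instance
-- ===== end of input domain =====

-- B replaces A's Fenwick tree + coordinate compression by a plain quadratic double scan
-- (count, for each i, the strictly greater elements among nums[:i]); objective: simpler.

-- ===== PORT A =====

-- `i & -i` of Python; these two facts are cited by the ports' decreasing_by only.
theorem pv_band_eq (i : Int) (h : 0 < i) :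
    PySem.Int.band i (-i) = ((i.toNat - (i.toNat &&& (i.toNat - 1)) : ℕ) : Int) := by
  have h0 : (0 : Int) ≤ i := le_of_lt h
  have h1 : ¬ (0 : Int) ≤ -i := by omega
  have h2 : (-(-i) - 1).toNat = i.toNat - 1 := by omega
  simp only [PySem.Int.band, if_pos h0, if_neg h1, h2]

theorem pv_band_pos (i : Int) (h : 0 < i) : 0 < PySem.Int.band i (-i) := by
  rw [pv_band_eq i h]
  have h1 : i.toNat &&& (i.toNat - 1) ≤ i.toNat - 1 := Nat.and_le_right
  omega

theorem pv_band_le (i : Int) (h : 0 < i) : PySem.Int.band i (-i) ≤ i := by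
  rw [pv_band_eq i h]; omega

-- inner `while` of A's update(); the `0 < i` side of the guard only makes the
-- recursion total (every actual call has i ≥ 1, as in the Python)
def fenUpdateLoop (tree : List Int) (i : Int) : List Int :=
  if h : 0 < i ∧ i < (tree.length : Int) then
    fenUpdateLoop (tree.set i.toNat (tree.getD i.toNat 0 + 1)) (i + PySem.Int.band i (-i))
  else tree
termination_by ((tree.length : Int) - i).toNat
decreasing_by
  have hb := pv_band_pos i h.1
  simp only [List.length_set]
  omega

-- update(i): i += 1, then the while loop
def fenUpdate (tree : List Int) (i : Int) : List Int := fenUpdateLoop tree (i + 1)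

-- inner `while` of A's query(); tree[i] is always in range on every actual call
def fenQueryLoop (tree : List Int) (i : Int) : Int :=
  if h : 0 < i then
    tree.getD i.toNat 0 + fenQueryLoop tree (i - PySem.Int.band i (-i))
  else 0
termination_by i.toNat
decreasing_by
  have h1 := pv_band_pos i h
  have h2 := pv_band_le i h
  omega

-- query(i): i += 1, then the while loop (summing the same cells)
def fenQuery (tree : List Int) (i : Int) : Int := fenQueryLoop tree (i + 1)

def count_bigger_fenwick_strict (nums : List Int) : List Int :=
  let sorted_unique := PySem.List.sorted (PySem.Set.ofList nums) (fun x => x) false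
  let idx_map := (PySem.List.enumerate sorted_unique).foldl
      (fun d p => d.insert p.2 p.1) PySem.Dict.empty
  let n := sorted_unique.length
  let tree := List.replicate (n + 2) (0 : Int)
  (nums.foldl (fun st num =>
      -- idx_map[num]: the key is always present, so the .getD 0 default is never used
      let idx := (idx_map.get? num).getD 0
      let total_seen := (st.2.length : Int)
      let elements_le_current := fenQuery st.1 idx
      let bigger_count := total_seen - elements_le_current
      (fenUpdate st.1 idx, st.2 ++ [bigger_count]))
    (tree, ([] : List Int))).2

-- ===== PORT B =====
def count_bigger_fenwick_strict_alt (nums : List Int) : List Int :=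
  (List.range nums.length).map (fun i =>
    (((nums.take i).filter (fun x => decide (nums.getD i 0 < x))).length : Int))

-- ===== PRECONDITION & SPEC =====
def Spec_count_bigger_fenwick_strict (nums : List Int) (out : List Int) : Prop := out = count_bigger_fenwick_strict_alt nums
instance (nums : List Int) (out : List Int) : Decidable (Spec_count_bigger_fenwick_strict nums out) := by unfold Spec_count_bigger_fenwick_strict; infer_instance

-- ===== CLAIM (what is proved, stated in full; the proofs are below) =====
def Claim_equal_count_bigger_fenwick_strict : Prop := ∀ (nums : List Int), Dom_count_bigger_fenwick_strict nums → Spec_count_bigger_fenwick_strict nums (count_bigger_fenwick_strict nums)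

-- ===== LEMMAS AND PROOFS =====

-- lowest set bit, over ℕ
def lbN (n : ℕ) : ℕ := n - (n &&& (n - 1))

theorem testBit_false_of_dvd (m i : ℕ) (h : 2 ^ (i + 1) ∣ m) : m.testBit i = false := by
  obtain ⟨t, rfl⟩ := h
  rw [Nat.testBit_eq_decide_div_mod_eq]
  have : 2 ^ (i + 1) * t / 2 ^ i = 2 * t := by
    have e : 2 ^ (i + 1) * t = 2 ^ i * (2 * t) := by ring
    rw [e, Nat.mul_div_cancel_left _ (Nat.two_pow_pos i)]
  simp [this, Nat.mul_mod_right]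

theorem and_pred_eq (n : ℕ) (hn : 0 < n) :
    n &&& (n - 1) = n - 2 ^ (n.factorization 2) := by
  obtain ⟨s, hns⟩ := Nat.ordProj_dvd n 2
  have hnotdvd := Nat.pow_succ_factorization_not_dvd hn.ne' Nat.prime_two
  generalize hv : n.factorization 2 = v at hns hnotdvd ⊢
  have hP : 0 < 2 ^ v := Nat.two_pow_pos v
  have hs_pos : 0 < s := by
    rcases Nat.eq_zero_or_pos s with h | h
    · subst h; simp at hns; omega
    · exact h
  have hs_odd : ¬ 2 ∣ s := by
    rintro ⟨t, rfl⟩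
    exact hnotdvd ⟨t, hns.trans (by ring)⟩
  obtain ⟨s', rfl⟩ : ∃ s', s = s' + 1 := ⟨s - 1, by omega⟩
  have hs'e : s' % 2 = 0 := by omega
  have hmulsucc : 2 ^ v * (s' + 1) = 2 ^ v * s' + 2 ^ v := Nat.mul_succ _ _
  have hdiv_n : n / 2 ^ v = s' + 1 := by rw [hns]; exact Nat.mul_div_cancel_left _ hP
  have hn1 : n - 1 = 2 ^ v * s' + (2 ^ v - 1) := by omega
  have hdiv_n1 : (n - 1) / 2 ^ v = s' := by
    rw [hn1, Nat.mul_add_div hP, Nat.div_eq_of_lt (by omega)]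
    omega
  have hsub : n - 2 ^ v = 2 ^ v * s' := by omega
  have hdiv_sub : (n - 2 ^ v) / 2 ^ v = s' := by rw [hsub, Nat.mul_div_cancel_left _ hP]
  apply Nat.eq_of_testBit_eq
  intro i
  rw [Nat.testBit_and]
  rcases lt_trichotomy i v with hiv | rfl | hiv
  · have d1 : 2 ^ (i + 1) ∣ n := dvd_trans (pow_dvd_pow 2 (by omega)) ⟨s' + 1, hns⟩
    have d2 : 2 ^ (i + 1) ∣ (n - 2 ^ v) := by
      rw [hsub]; exact dvd_trans (pow_dvd_pow 2 (by omega)) (Dvd.intro _ rfl)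
    rw [testBit_false_of_dvd _ _ d1, testBit_false_of_dvd _ _ d2]
    simp
  · rw [Nat.testBit_eq_decide_div_mod_eq, Nat.testBit_eq_decide_div_mod_eq,
      Nat.testBit_eq_decide_div_mod_eq, hdiv_n, hdiv_n1, hdiv_sub]
    have h1 : (s' + 1) % 2 = 1 := by omega
    simp [h1, hs'e]
  · set k := i - v with hkdef
    have hk : i = v + k := by omega
    have hdvdk : ¬ 2 ^ k ∣ (s' + 1) := fun hd =>
      hs_odd (dvd_trans (dvd_pow_self 2 (by omega)) hd)
    have hsucc : (s' + 1) / 2 ^ k = s' / 2 ^ k := by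
      rw [Nat.succ_div]; simp [hdvdk]
    rw [Nat.testBit_eq_decide_div_mod_eq, Nat.testBit_eq_decide_div_mod_eq,
      Nat.testBit_eq_decide_div_mod_eq, hk, pow_add,
      ← Nat.div_div_eq_div_mul, ← Nat.div_div_eq_div_mul, ← Nat.div_div_eq_div_mul,
      hdiv_n, hdiv_n1, hdiv_sub, hsucc]
    exact Bool.and_self _

theorem lbN_eq (n : ℕ) (hn : 0 < n) : lbN n = 2 ^ (n.factorization 2) := by
  have h1 := and_pred_eq n hn
  have h2 : 2 ^ (n.factorization 2) ≤ n := Nat.ordProj_le 2 hn.ne'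
  unfold lbN
  generalize hp : 2 ^ (n.factorization 2) = p at h1 h2 ⊢
  have h3 : n &&& (n - 1) ≤ n - 1 := Nat.and_le_right
  omega

theorem lbN_pos (n : ℕ) (hn : 0 < n) : 0 < lbN n := by
  rw [lbN_eq n hn]; positivity

theorem lbN_le (n : ℕ) (hn : 0 < n) : lbN n ≤ n := by
  rw [lbN_eq n hn]; exact Nat.ordProj_le 2 hn.ne'

theorem band_eq_lbN (α : ℕ) (h : 0 < α) :
    PySem.Int.band (α : Int) (-(α : Int)) = (lbN α : Int) := by
  have h' : (0 : Int) < (α : Int) := by exact_mod_cast h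
  rw [pv_band_eq _ h']
  simp [lbN]

-- 2-adic valuation of a sum where the large part is divisible by a higher power
theorem fen_val_add (B r k : ℕ) (hB : 2 ^ k ∣ B) (hr : 0 < r)
    (hrk : r.factorization 2 < k) : (B + r).factorization 2 = r.factorization 2 := by
  have hBr : (0:ℕ) < B + r := by omega
  have h1 : 2 ^ (r.factorization 2) ∣ B + r :=
    dvd_add (dvd_trans (pow_dvd_pow 2 (le_of_lt hrk)) hB) (Nat.ordProj_dvd r 2)
  have h2 : ¬ 2 ^ (r.factorization 2 + 1) ∣ B + r := by
    intro hd
    have hdB : 2 ^ (r.factorization 2 + 1) ∣ B := dvd_trans (pow_dvd_pow 2 (by omega)) hB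
    have hdr : 2 ^ (r.factorization 2 + 1) ∣ r := by
      have := Nat.dvd_sub hd hdB
      simpa using this
    exact Nat.pow_succ_factorization_not_dvd hr.ne' Nat.prime_two hdr
  have le1 : r.factorization 2 ≤ (B + r).factorization 2 :=
    (Nat.Prime.pow_dvd_iff_le_factorization Nat.prime_two hBr.ne').1 h1
  have le2 : (B + r).factorization 2 ≤ r.factorization 2 := by
    by_contra hcon
    exact h2 ((Nat.Prime.pow_dvd_iff_le_factorization Nat.prime_two hBr.ne').2 (by omega))
  omega

-- a step from inside (0, 2^V) cannot overshoot 2^V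
theorem fen_G (r V : ℕ) (h0 : 0 < r) (h1 : r < 2 ^ V) : r + lbN r ≤ 2 ^ V := by
  have hw := lbN_eq r h0
  obtain ⟨t, hrt⟩ := Nat.ordProj_dvd r 2
  have hfr_le : 2 ^ (r.factorization 2) ≤ r := hw ▸ lbN_le r h0
  have hwV : r.factorization 2 < V := by
    by_contra hcon
    push_neg at hcon
    have : (2:ℕ) ^ V ≤ 2 ^ (r.factorization 2) := Nat.pow_le_pow_right (by norm_num) hcon
    omega
  have hlt : t < 2 ^ (V - r.factorization 2) := by
    by_contra hcon
    push_neg at hcon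
    have : (2:ℕ) ^ V ≤ r := by
      calc (2:ℕ) ^ V = 2 ^ (r.factorization 2) * 2 ^ (V - r.factorization 2) := by
            rw [← pow_add]; congr 1; omega
        _ ≤ 2 ^ (r.factorization 2) * t := Nat.mul_le_mul_left _ hcon
        _ = r := hrt.symm
    omega
  calc r + lbN r = 2 ^ (r.factorization 2) * t + 2 ^ (r.factorization 2) := by
        rw [hw]; omega
    _ = 2 ^ (r.factorization 2) * (t + 1) := by ring
    _ ≤ 2 ^ (r.factorization 2) * 2 ^ (V - r.factorization 2) :=
        Nat.mul_le_mul_left _ (by omega)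
    _ = 2 ^ V := by rw [← pow_add]; congr 1; omega

-- c - lbN c is divisible by the next power of two
theorem lbN_sub_dvd (c : ℕ) (hc : 0 < c) :
    2 ^ (c.factorization 2 + 1) ∣ (c - lbN c) := by
  obtain ⟨s, hcs⟩ := Nat.ordProj_dvd c 2
  have hnotdvd := Nat.pow_succ_factorization_not_dvd hc.ne' Nat.prime_two
  have hl : lbN c = 2 ^ (c.factorization 2) := lbN_eq c hc
  generalize hv : c.factorization 2 = v at hcs hnotdvd hl ⊢
  have hs_odd : ¬ 2 ∣ s := by
    rintro ⟨u, rfl⟩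
    exact hnotdvd ⟨u, hcs.trans (by ring)⟩
  obtain ⟨s', rfl⟩ : ∃ s', s = s' + 1 := ⟨s - 1, by omega⟩
  obtain ⟨t, rfl⟩ : ∃ t, s' = 2 * t := ⟨s' / 2, by omega⟩
  refine ⟨t, ?_⟩
  have hms : 2 ^ v * (2 * t + 1) = 2 ^ v * (2 * t) + 2 ^ v := by ring
  have hx : 2 ^ v * (2 * t) = 2 ^ (v + 1) * t := by ring
  omega

-- inside the covered window: the parent step stays in the window and lands at or below c
theorem fen_F1 (a c : ℕ) (ha : 0 < a) (h1 : c - lbN c < a) (h2 : a < c) :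
    c - lbN c < a + lbN a ∧ a + lbN a ≤ c := by
  have hc : 0 < c := by omega
  have hlc := lbN_eq c hc
  have hlc_le := lbN_le c hc
  have hlc_pos := lbN_pos c hc
  have hla_pos := lbN_pos a ha
  constructor
  · omega
  · -- write a = (c - lbN c) + r with 0 < r < lbN c
    obtain ⟨r, hr_pos, hr_lt, har⟩ : ∃ r, 0 < r ∧ r < lbN c ∧ a = (c - lbN c) + r :=
      ⟨a - (c - lbN c), by omega, by omega, by omega⟩
    have hlab : lbN a = lbN r := by
      rcases Nat.eq_zero_or_pos (c - lbN c) with hB0 | hBpos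
      · rw [har, hB0, Nat.zero_add]
      · have hfr : r.factorization 2 < c.factorization 2 + 1 := by
          have h2fr : 2 ^ (r.factorization 2) ≤ r := (lbN_eq r hr_pos) ▸ lbN_le r hr_pos
          have : r < 2 ^ (c.factorization 2) := hlc ▸ hr_lt
          by_contra hcon
          push_neg at hcon
          have : (2:ℕ) ^ (c.factorization 2) ≤ 2 ^ (r.factorization 2) :=
            Nat.pow_le_pow_right (by norm_num) (by omega)
          omega
        have hval : a.factorization 2 = r.factorization 2 := by
          rw [har]
          exact fen_val_add _ _ _ (lbN_sub_dvd c hc) hr_pos hfr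
        rw [lbN_eq a ha, lbN_eq r hr_pos, hval]
    have hG : r + lbN r ≤ 2 ^ (c.factorization 2) := fen_G r _ hr_pos (hlc ▸ hr_lt)
    omega

-- below the window: the parent step either stays below it or jumps past c
theorem fen_F2 (a c : ℕ) (ha : 0 < a) (hc : 0 < c) (h : a ≤ c - lbN c) :
    a + lbN a ≤ c - lbN c ∨ c < a + lbN a := by
  have hB2 := lbN_sub_dvd c hc
  have hlc := lbN_eq c hc
  have hlc_le := lbN_le c hc
  have hla := lbN_eq a ha
  by_cases hw : a.factorization 2 ≤ c.factorization 2
  · left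
    have hdvA : 2 ^ (a.factorization 2) ∣ a := Nat.ordProj_dvd a 2
    have hdvB : 2 ^ (a.factorization 2) ∣ (c - lbN c) :=
      dvd_trans (pow_dvd_pow 2 (by omega)) hB2
    have hne : a ≠ c - lbN c := by
      rintro rfl
      have := (Nat.Prime.pow_dvd_iff_le_factorization Nat.prime_two ha.ne').1 hB2
      omega
    have hlt : a < c - lbN c := lt_of_le_of_ne h hne
    have hdvd_sub : 2 ^ (a.factorization 2) ∣ (c - lbN c - a) := Nat.dvd_sub hdvB hdvA
    have hge : 2 ^ (a.factorization 2) ≤ c - lbN c - a := Nat.le_of_dvd (by omega) hdvd_sub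
    omega
  · push_neg at hw
    by_cases hle : a + lbN a ≤ c - lbN c
    · left; exact hle
    · right
      push_neg at hle
      have hdva : 2 ^ (c.factorization 2 + 1) ∣ a :=
        dvd_trans (pow_dvd_pow 2 (by omega)) (Nat.ordProj_dvd a 2)
      have hdvlb : 2 ^ (c.factorization 2 + 1) ∣ lbN a := by
        rw [hla]; exact pow_dvd_pow 2 (by omega)
      have hdvd_diff : 2 ^ (c.factorization 2 + 1) ∣ (a + lbN a - (c - lbN c)) :=
        Nat.dvd_sub (dvd_add hdva hdvlb) hB2
      have hge : 2 ^ (c.factorization 2 + 1) ≤ a + lbN a - (c - lbN c) :=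
        Nat.le_of_dvd (by omega) hdvd_diff
      have h2v1 : (2:ℕ) ^ (c.factorization 2 + 1) = 2 * 2 ^ (c.factorization 2) := by
        rw [pow_succ]; ring
      have hPv : 0 < (2:ℕ) ^ (c.factorization 2) := Nat.two_pow_pos _
      omega

theorem fenUpdateLoop_length (t : List Int) (i : Int) :
    (fenUpdateLoop t i).length = t.length := by
  rw [fenUpdateLoop]
  split
  next h =>
    rw [fenUpdateLoop_length]
    simp
  next h => rfl
termination_by ((t.length : Int) - i).toNat
decreasing_by
  rename_i h
  have hb := pv_band_pos i h.1
  simp only [List.length_set]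
  omega

theorem fenUpdateLoop_getD_aux (m : ℕ) :
    ∀ (t : List Int) (α c : ℕ), 0 < α → t.length ≤ α + m →
    (fenUpdateLoop t (α : Int)).getD c 0 =
      t.getD c 0 + (if c - lbN c < α ∧ α ≤ c ∧ c < t.length then 1 else 0) := by
  induction m with
  | zero =>
    intro t α c hα hm
    rw [fenUpdateLoop, dif_neg (by push_cast; omega), if_neg (by omega)]
    omega
  | succ m ih =>
    intro t α c hα hm
    by_cases hlen : α < t.length
    · rw [fenUpdateLoop, dif_pos (by constructor <;> [exact_mod_cast hα; exact_mod_cast hlen])]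
      have hband := band_eq_lbN α hα
      have hlbα := lbN_pos α hα
      have harg : (α : Int) + PySem.Int.band (α : Int) (-(α : Int)) = ((α + lbN α : ℕ) : Int) := by
        rw [hband]; push_cast; ring
      simp only [Int.toNat_natCast, harg]
      rw [ih (t.set α (t.getD α 0 + 1)) (α + lbN α) c (by omega)
          (by simp only [List.length_set]; omega)]
      have hset_len : (t.set α (t.getD α 0 + 1)).length = t.length := by simp
      rw [hset_len]
      by_cases hcα : c = α
      · subst hcα
        have hgd : (t.set c (t.getD c 0 + 1)).getD c 0 = t.getD c 0 + 1 := by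
          simp [List.getD_eq_getElem?_getD, List.getElem?_set_self (by omega)]
        have hp := lbN_pos c (by omega)
        have hlb_le := lbN_le c (by omega)
        rw [hgd, if_neg (by omega), if_pos ⟨by omega, le_refl _, hlen⟩]
        omega
      · have hgd : (t.set α (t.getD α 0 + 1)).getD c 0 = t.getD c 0 := by
          simp only [List.getD_eq_getElem?_getD,
            List.getElem?_set_ne (show α ≠ c by omega)]
        rw [hgd]
        have hstep : (if c - lbN c < α + lbN α ∧ α + lbN α ≤ c ∧ c < t.length then (1:Int) else 0)
            = (if c - lbN c < α ∧ α ≤ c ∧ c < t.length then 1 else 0) := by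
          by_cases hcL : c < t.length
          · rcases lt_trichotomy α c with hlt | heq | hgt
            · have hc0 : 0 < c := by omega
              by_cases hwin : c - lbN c < α
              · have hF := fen_F1 α c hα hwin hlt
                rw [if_pos ⟨hF.1, hF.2, hcL⟩, if_pos ⟨hwin, by omega, hcL⟩]
              · have hF := fen_F2 α c hα hc0 (by omega)
                rw [if_neg (fun hcon => by rcases hF with h | h <;> omega),
                    if_neg (fun hcon => by omega)]
            · exact absurd heq.symm hcα
            · rw [if_neg (by omega), if_neg (by omega)]
          · rw [if_neg (by omega), if_neg (by omega)]
        rw [hstep]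
    · rw [fenUpdateLoop, dif_neg (by push_cast; omega), if_neg (by omega)]
      omega

-- pointwise effect of one update pass
theorem fenUpdateLoop_getD (t : List Int) (α : ℕ) (hα : 0 < α) (c : ℕ) :
    (fenUpdateLoop t (α : Int)).getD c 0 =
      t.getD c 0 + (if c - lbN c < α ∧ α ≤ c ∧ c < t.length then 1 else 0) :=
  fenUpdateLoop_getD_aux t.length t α c hα (by omega)

theorem fenQueryLoop_zero (m : ℕ) (b : ℕ) :
    fenQueryLoop (List.replicate m (0 : Int)) (b : Int) = 0 := by
  induction b using Nat.strong_induction_on with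
  | _ b ih =>
    rw [fenQueryLoop]
    by_cases hb : 0 < b
    · rw [dif_pos (by exact_mod_cast hb)]
      have hband := band_eq_lbN b hb
      have hlb1 := lbN_pos b hb
      have hlb2 := lbN_le b hb
      have harg : (b : Int) - PySem.Int.band (b : Int) (-(b : Int)) = ((b - lbN b : ℕ) : Int) := by
        rw [hband]; omega
      rw [harg, ih _ (by omega)]
      have : (List.replicate m (0 : Int)).getD ((b : Int)).toNat 0 = 0 := by
        simp [List.getD_eq_getElem?_getD, List.getElem?_replicate]
        split <;> simp
      rw [this]
      norm_num
    · rw [dif_neg (by exact_mod_cast hb)]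

-- one update shifts a query by exactly its indicator
theorem fen_query_update (t : List Int) (α b : ℕ) (hα : 0 < α)
    (hαL : α < t.length) (hbL : b < t.length) :
    fenQueryLoop (fenUpdateLoop t (α : Int)) (b : Int) =
      fenQueryLoop t (b : Int) + (if α ≤ b then 1 else 0) := by
  induction b using Nat.strong_induction_on with
  | _ b ih =>
    by_cases hb : 0 < b
    · have hband := band_eq_lbN b hb
      have hlb1 := lbN_pos b hb
      have hlb2 := lbN_le b hb
      have harg : (b : Int) - PySem.Int.band (b : Int) (-(b : Int)) = ((b - lbN b : ℕ) : Int) := by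
        rw [hband]; omega
      conv_lhs => rw [fenQueryLoop]
      conv_rhs => rw [fenQueryLoop]
      rw [dif_pos (by exact_mod_cast hb), dif_pos (by exact_mod_cast hb), harg,
        ih (b - lbN b) (by omega) (by omega)]
      simp only [Int.toNat_natCast]
      rw [fenUpdateLoop_getD t α hα b]
      split_ifs <;> omega
    · conv_lhs => rw [fenQueryLoop]
      conv_rhs => rw [fenQueryLoop]
      rw [dif_neg (by exact_mod_cast hb), dif_neg (by exact_mod_cast hb), if_neg (by omega)]
      norm_num

-- ===== VERDICT (by name: the statement is the Claim_ definition above) =====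
theorem count_bigger_fenwick_strict_spec : Claim_equal_count_bigger_fenwick_strict := by
  intro nums _hdom
  unfold Spec_count_bigger_fenwick_strict
  simp only [count_bigger_fenwick_strict, count_bigger_fenwick_strict_alt, fenUpdate, fenQuery]
  set su := PySem.List.sorted (PySem.Set.ofList nums) (fun x => x) false with hsu_def
  set dm := (PySem.List.enumerate su).foldl (fun d p => d.insert p.2 p.1)
      (PySem.Dict.empty : PySem.Dict Int Int) with hdm_def
  have hpair : su.Pairwise (· < ·) := PySem.List.sorted_ofList_pairwise_lt nums
  have hnodup : su.Nodup := hpair.imp ne_of_lt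
  have hmem : ∀ x : Int, x ∈ su ↔ x ∈ nums := fun x =>
    (PySem.List.mem_sorted _ _ _ x).trans (PySem.Set.mem_ofList nums x)
  have hitems : dm.items = (PySem.List.enumerate su).map (fun p => (p.2, p.1)) := by
    rw [hdm_def]
    have h := PySem.Dict.items_foldl_insert_fresh (PySem.List.enumerate su)
        (fun p => p.2) (fun p => p.1) (PySem.Dict.empty)
        (fun a _ => PySem.Dict.contains_empty _)
        (by rw [PySem.List.map_snd_enumerate]; exact hnodup)
    simpa using h
  have hkeys : dm.keys = su := by
    have h1 : dm.keys = dm.items.map (·.1) := rfl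
    rw [h1, hitems, List.map_map]
    have h2 : ((fun (p : ℤ × ℤ) => p.1) ∘ (fun (p : ℤ × ℤ) => (p.2, p.1)))
        = fun (p : ℤ × ℤ) => p.2 := rfl
    rw [h2, PySem.List.map_snd_enumerate]
  have hget : ∀ (k : ℕ) (hk : k < su.length), dm.get? su[k] = some (k : Int) := by
    intro k hk
    refine PySem.Dict.get?_of_mem_items dm ?_ (by rw [hkeys]; exact hnodup)
    rw [hitems]
    refine List.mem_map.2 ⟨((k : Int), su[k]), ?_, rfl⟩
    exact (PySem.List.mem_enumerate_iff su 0 _).2 ⟨k, hk, by simp⟩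
  have hgetI : ∀ v ∈ nums, dm.get? v = some ((su.idxOf v : ℕ) : Int) := by
    intro v hv
    have hvsu : v ∈ su := (hmem v).2 hv
    have hlt := List.idxOf_lt_length_of_mem hvsu
    have h := hget (su.idxOf v) hlt
    rwa [List.getElem_idxOf] at h
  have hIlt : ∀ v ∈ nums, su.idxOf v < su.length := fun v hv =>
    List.idxOf_lt_length_of_mem ((hmem v).2 hv)
  have hImono : ∀ u ∈ nums, ∀ v ∈ nums, (u ≤ v ↔ su.idxOf u ≤ su.idxOf v) := by
    intro u hu v hv
    have hgl := List.pairwise_iff_getElem.1 hpair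
    have hul := hIlt u hu
    have hvl := hIlt v hv
    constructor
    · intro huv
      by_contra hcon
      have hlt : su.idxOf v < su.idxOf u := by omega
      have := hgl _ _ hvl hul hlt
      rw [List.getElem_idxOf, List.getElem_idxOf] at this
      omega
    · intro hle
      rcases Nat.lt_or_ge (su.idxOf u) (su.idxOf v) with hlt | hge
      · have := hgl _ _ hul hvl hlt
        rw [List.getElem_idxOf, List.getElem_idxOf] at this
        omega
      · have heq : su.idxOf u = su.idxOf v := by omega
        have : u = v := by
          have h1 : su[su.idxOf u]'hul = u := List.getElem_idxOf _
          have h2 : su[su.idxOf v]'hvl = v := List.getElem_idxOf _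
          rw [← h1, ← h2]
          congr 1
        omega
  -- the tree after processing a prefix p, and the length it keeps
  have hlen' : ∀ (p : List Int) (tr : List Int),
      (p.foldl (fun tr x => fenUpdateLoop tr ((dm.get? x).getD 0 + 1)) tr).length = tr.length := by
    intro p
    induction p with
    | nil => intro tr; rfl
    | cons y p ih =>
      intro tr
      rw [List.foldl_cons, ih, fenUpdateLoop_length]
  -- the Fenwick query counts the processed elements ≤ v
  have hq : ∀ (p : List Int), (∀ x ∈ p, x ∈ nums) → ∀ v ∈ nums,
      fenQueryLoop (p.foldl (fun tr x => fenUpdateLoop tr ((dm.get? x).getD 0 + 1))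
          (List.replicate (su.length + 2) 0)) ((su.idxOf v + 1 : ℕ) : Int)
        = ((p.countP (fun y => decide (y ≤ v)) : ℕ) : Int) := by
    intro p
    induction p using List.reverseRecOn with
    | nil =>
      intro _ v hv
      simpa using fenQueryLoop_zero (su.length + 2) (su.idxOf v + 1)
    | append_singleton p y ihp =>
      intro hmem' v hv
      have hy : y ∈ nums := hmem' y (by simp)
      have hpm : ∀ x ∈ p, x ∈ nums := fun x hx => hmem' x (by simp [hx])
      rw [List.foldl_append, List.foldl_cons, List.foldl_nil, hgetI y hy]
      simp only [Option.getD_some]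
      have harg : ((su.idxOf y : ℕ) : Int) + 1 = ((su.idxOf y + 1 : ℕ) : Int) := by
        push_cast; ring
      rw [harg]
      have hL : (p.foldl (fun tr x => fenUpdateLoop tr ((dm.get? x).getD 0 + 1))
          (List.replicate (su.length + 2) 0)).length = su.length + 2 := by
        rw [hlen']; simp
      rw [fen_query_update _ _ _ (by omega)
          (by rw [hL]; have := hIlt y hy; omega)
          (by rw [hL]; have := hIlt v hv; omega)]
      rw [ihp hpm v hv]
      have hiff := hImono y hy v hv
      rw [List.countP_append]
      simp only [List.countP_cons, List.countP_nil]
      by_cases hyv : y ≤ v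
      · rw [if_pos (by have := hiff.1 hyv; omega)]
        simp only [hyv, decide_true]
        push_cast
        ring
      · rw [if_neg (by intro hcon; exact hyv (hiff.2 (by omega)))]
        simp only [hyv, decide_false]
        push_cast
        ring
  -- the main loop invariant: state after a prefix = (tree of the prefix, B's outputs so far)
  have hmain : ∀ (s p : List Int), nums = p ++ s →
      List.foldl (fun (st : List Int × List Int) num =>
          (fenUpdateLoop st.1 ((dm.get? num).getD 0 + 1),
            st.2 ++ [(st.2.length : Int) - fenQueryLoop st.1 ((dm.get? num).getD 0 + 1)]))
        (p.foldl (fun tr x => fenUpdateLoop tr ((dm.get? x).getD 0 + 1))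
            (List.replicate (su.length + 2) 0),
          (List.range p.length).map (fun i =>
            (((nums.take i).filter (fun x => decide (nums.getD i 0 < x))).length : Int))) s
      = ((p ++ s).foldl (fun tr x => fenUpdateLoop tr ((dm.get? x).getD 0 + 1))
            (List.replicate (su.length + 2) 0),
          (List.range (p ++ s).length).map (fun i =>
            (((nums.take i).filter (fun x => decide (nums.getD i 0 < x))).length : Int))) := by
    intro s
    induction s with
    | nil => intro p _; simp
    | cons x s' ih =>
      intro p hsplit
      have hx : x ∈ nums := by rw [hsplit]; simp
      have hpm : ∀ z ∈ p, z ∈ nums := fun z hz => by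
        rw [hsplit]; exact List.mem_append_left _ hz
      have hsplit' : nums = (p ++ [x]) ++ s' := by rw [hsplit]; simp
      rw [List.foldl_cons, show p ++ x :: s' = (p ++ [x]) ++ s' by simp,
        ← ih (p ++ [x]) hsplit']
      congr 1
      refine Prod.ext ?_ ?_
      · rw [List.foldl_append, List.foldl_cons, List.foldl_nil]
      · have hgx := hgetI x hx
        rw [hgx]
        simp only [Option.getD_some, List.length_map, List.length_range]
        have harg : ((su.idxOf x : ℕ) : Int) + 1 = ((su.idxOf x + 1 : ℕ) : Int) := by
          push_cast; ring
        rw [harg, hq p hpm x hx]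
        have hR : (List.range (p ++ [x]).length).map (fun i =>
              (((nums.take i).filter (fun x => decide (nums.getD i 0 < x))).length : Int))
            = ((List.range p.length).map (fun i =>
                (((nums.take i).filter (fun x => decide (nums.getD i 0 < x))).length : Int)))
              ++ [(((nums.take p.length).filter
                    (fun z => decide (nums.getD p.length 0 < z))).length : Int)] := by
          simp [List.range_succ]
        rw [hR]
        congr 1
        have htake : nums.take p.length = p := by
          rw [hsplit]; exact List.take_left
        have hgetx : nums.getD p.length 0 = x := by
          rw [hsplit, List.getD_eq_getElem?_getD,
            List.getElem?_append_right (le_refl p.length)]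
          simp
        rw [htake, hgetx]
        have hc1 : (p.filter (fun z => decide (x < z))).length
            = p.countP (fun z => decide (x < z)) :=
          List.countP_eq_length_filter.symm
        have hsplitc := List.length_eq_countP_add_countP (fun y => decide (y ≤ x)) (l := p)
        have hcompl : p.countP (fun a => decide ¬(decide (a ≤ x) = true))
            = p.countP (fun z => decide (x < z)) := by
          apply List.countP_congr
          intro a _
          simp [not_le]
        congr 1
        simp only [hc1]
        omega
  have hfin := hmain nums [] (by simp)
  simp only [List.foldl_nil, List.length_nil, List.range_zero, List.map_nil,
    List.nil_append] at hfin
  rw [congrArg Prod.snd hfin]
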